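-- pv_equiv track=rewrite | github.com/Discorre/SecondLab | Var10Python/ChessboardMovement.py | find_start_position
-- ===== SOURCE A (Python) =====
-- def is_valid_move(x, y, N, M, move):
--     if move == 'L' and y > 1:
--         return True
--     elif move == 'R' and y < M:
--         return True
--     elif move == 'U' and x > 1:
--         return True
--     elif move == 'D' and x < N:
--         return True
--     return False
--
-- def find_start_position(N, M, s):
--     for i in range(1, N+1):
--         for j in range(1, M+1):
--             x, y = i, j
--             valid = True
--
--             for move in s:
--                 if not is_valid_move(x, y, N, M, move):
--                     valid = False
--                     break
--
--                 if move == 'L':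
--                     y -= 1
--                 elif move == 'R':
--                     y += 1
--                 elif move == 'U':
--                     x -= 1
--                 elif move == 'D':
--                     x += 1
--
--             if valid:
--                 return (i, j)
--     return (-1, -1)
-- ===== SOURCE B (Python) =====
-- def find_start_position(N, M, s):
--     # Prefix-extremes of the displacement: a start (i, j) works iff every
--     # prefix position stays on the board, i.e. i in [1-xmin, N-xmax] and
--     # j in [1-ymin, M-ymax]; the row-major-first such start is the pair of
--     # lower ends. Any character outside 'LRUD' invalidates every start.
--     x = y = xmin = xmax = ymin = ymax = 0
--     for c in s:
--         if c == 'L':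
--             y -= 1
--         elif c == 'R':
--             y += 1
--         elif c == 'U':
--             x -= 1
--         elif c == 'D':
--             x += 1
--         else:
--             return (-1, -1)
--         if x < xmin: xmin = x
--         if x > xmax: xmax = x
--         if y < ymin: ymin = y
--         if y > ymax: ymax = y
--     i, j = 1 - xmin, 1 - ymin
--     if i + xmax <= N and j + ymax <= M:
--         return (i, j)
--     return (-1, -1)
-- ===== Notes on version B (the rewrite author's own statement) =====
-- stated objective: faster
-- what changed: Replaces the O(N*M*|s|) brute-force scan over all start cells with a single pass over s computing prefix min/max displacements, from which the first valid start cell is read off in closed form.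
import Mathlib
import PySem

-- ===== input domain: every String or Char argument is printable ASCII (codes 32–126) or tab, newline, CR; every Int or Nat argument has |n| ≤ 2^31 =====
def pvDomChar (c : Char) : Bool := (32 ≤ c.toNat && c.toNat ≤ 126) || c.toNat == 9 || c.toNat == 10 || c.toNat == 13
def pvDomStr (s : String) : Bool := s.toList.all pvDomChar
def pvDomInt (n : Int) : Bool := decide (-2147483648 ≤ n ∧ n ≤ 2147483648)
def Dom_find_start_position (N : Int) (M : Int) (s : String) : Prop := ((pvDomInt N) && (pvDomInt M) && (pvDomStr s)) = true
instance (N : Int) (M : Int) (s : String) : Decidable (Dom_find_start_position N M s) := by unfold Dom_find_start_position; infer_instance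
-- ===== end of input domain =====

-- B replaces A's O(N*M*|s|) scan over all start cells by one O(|s|) pass of
-- prefix min/max displacements from which the first valid start is read off.

-- ===== PORT A =====
def is_valid_move (x y N M : Int) (move : Char) : Bool :=
  if move = 'L' ∧ 1 < y then true
  else if move = 'R' ∧ y < M then true
  else if move = 'U' ∧ 1 < x then true
  else if move = 'D' ∧ x < N then true
  else false

-- the inner `for move in s` loop with its `valid` flag and `break`
def pvWalk (N M : Int) : List Char → Int → Int → Bool
  | [], _, _ => true
  | m :: rest, x, y =>
    if is_valid_move x y N M m = false then false
    else
      let xy : Int × Int :=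
        if m = 'L' then (x, y - 1)
        else if m = 'R' then (x, y + 1)
        else if m = 'U' then (x - 1, y)
        else if m = 'D' then (x + 1, y)
        else (x, y)
      pvWalk N M rest xy.1 xy.2

-- the `for j in range(1, M+1)` loop with its early `return (i, j)`
def pvLoopJ (N M : Int) (s : List Char) (i : Int) : List Int → Option (List Int)
  | [] => none
  | j :: js => if pvWalk N M s i j then some [i, j] else pvLoopJ N M s i js

-- the `for i in range(1, N+1)` loop
def pvLoopI (N M : Int) (s : List Char) : List Int → Option (List Int)
  | [] => none
  | i :: is' =>
    match pvLoopJ N M s i (PySem.List.pyRange 1 (M + 1) 1) with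
    | some r => some r
    | none => pvLoopI N M s is'

def find_start_position (N : Int) (M : Int) (s : String) : List Int :=
  (pvLoopI N M s.toList (PySem.List.pyRange 1 (N + 1) 1)).getD [-1, -1]

-- ===== PORT B =====
-- one pass over s: current displacement (x, y) and its prefix extremes;
-- `none` = a character outside 'LRUD' was met (Source B's early `return (-1,-1)`)
def pvScan : List Char → Int → Int → Int → Int → Int → Int → Option (Int × Int × Int × Int)
  | [], _, _, xmin, xmax, ymin, ymax => some (xmin, xmax, ymin, ymax)
  | c :: cs, x, y, xmin, xmax, ymin, ymax =>
    let xy : Option (Int × Int) :=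
      if c = 'L' then some (x, y - 1)
      else if c = 'R' then some (x, y + 1)
      else if c = 'U' then some (x - 1, y)
      else if c = 'D' then some (x + 1, y)
      else none
    match xy with
    | none => none
    | some (x, y) => pvScan cs x y (min xmin x) (max xmax x) (min ymin y) (max ymax y)

def find_start_position_alt (N : Int) (M : Int) (s : String) : List Int :=
  match pvScan s.toList 0 0 0 0 0 0 with
  | none => [-1, -1]
  | some (xmin, xmax, ymin, ymax) =>
    let i := 1 - xmin
    let j := 1 - ymin
    if i + xmax ≤ N ∧ j + ymax ≤ M then [i, j] else [-1, -1]

-- ===== PRECONDITION & SPEC =====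
def Spec_find_start_position (N : Int) (M : Int) (s : String) (out : List Int) : Prop := out = find_start_position_alt N M s
instance (N : Int) (M : Int) (s : String) (out : List Int) : Decidable (Spec_find_start_position N M s out) := by unfold Spec_find_start_position; infer_instance

-- ===== CLAIM (what is proved, stated in full; the proofs are below) =====
def Claim_equal_find_start_position : Prop := ∀ (N : Int) (M : Int) (s : String), Dom_find_start_position N M s → Spec_find_start_position N M s (find_start_position N M s)

-- ===== LEMMAS AND PROOFS =====

def goodC (c : Char) : Bool := c = 'L' || c = 'R' || c = 'U' || c = 'D'

def stepX (c : Char) : Int := if c = 'U' then -1 else if c = 'D' then 1 else 0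
def stepY (c : Char) : Int := if c = 'L' then -1 else if c = 'R' then 1 else 0

def xlo : List Char → Int
  | [] => 0
  | c :: cs => min 0 (stepX c + xlo cs)

def xhi : List Char → Int
  | [] => 0
  | c :: cs => max 0 (stepX c + xhi cs)

def ylo : List Char → Int
  | [] => 0
  | c :: cs => min 0 (stepY c + ylo cs)

def yhi : List Char → Int
  | [] => 0
  | c :: cs => max 0 (stepY c + yhi cs)

theorem xlo_nonpos (cs : List Char) : xlo cs ≤ 0 := by
  cases cs <;> simp [xlo]
theorem xhi_nonneg (cs : List Char) : 0 ≤ xhi cs := by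
  cases cs <;> simp [xhi]
theorem ylo_nonpos (cs : List Char) : ylo cs ≤ 0 := by
  cases cs <;> simp [ylo]
theorem yhi_nonneg (cs : List Char) : 0 ≤ yhi cs := by
  cases cs <;> simp [yhi]

theorem ivm_L (x y N M : Int) : is_valid_move x y N M 'L' = decide (1 < y) := by
  simp [is_valid_move]
theorem ivm_R (x y N M : Int) : is_valid_move x y N M 'R' = decide (y < M) := by
  simp [is_valid_move]
theorem ivm_U (x y N M : Int) : is_valid_move x y N M 'U' = decide (1 < x) := by
  simp [is_valid_move]
theorem ivm_D (x y N M : Int) : is_valid_move x y N M 'D' = decide (x < N) := by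
  simp [is_valid_move]
theorem stepx_L : stepX 'L' = 0 := by decide
theorem stepx_R : stepX 'R' = 0 := by decide
theorem stepx_U : stepX 'U' = -1 := by decide
theorem stepx_D : stepX 'D' = 1 := by decide
theorem stepy_L : stepY 'L' = -1 := by decide
theorem stepy_R : stepY 'R' = 1 := by decide
theorem stepy_U : stepY 'U' = 0 := by decide
theorem stepy_D : stepY 'D' = 0 := by decide

theorem ivm_bad (x y N M : Int) (c : Char) (h : goodC c = false) :
    is_valid_move x y N M c = false := by
  simp [goodC] at h
  simp [is_valid_move, h.1.1.1, h.1.1.2, h.1.2, h.2]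

theorem walk_bad (N M : Int) (cs : List Char) (h : cs.all goodC = false) :
    ∀ x y, pvWalk N M cs x y = false := by
  induction cs with
  | nil => simp at h
  | cons c cs ih =>
    intro x y
    by_cases hc : goodC c = true
    · rw [List.all_cons, hc, Bool.true_and] at h
      simp only [pvWalk]
      split
      · rfl
      · exact ih h _ _
    · simp only [pvWalk, ivm_bad _ _ _ _ _ (by simpa using hc)]
      simp

theorem walk_char (N M : Int) (cs : List Char) (h : cs.all goodC = true) :
    ∀ x y, 1 ≤ x → x ≤ N → 1 ≤ y → y ≤ M →
      (pvWalk N M cs x y = true ↔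
        (1 ≤ x + xlo cs ∧ x + xhi cs ≤ N ∧ 1 ≤ y + ylo cs ∧ y + yhi cs ≤ M)) := by
  induction cs with
  | nil => intro x y h1 h2 h3 h4; simp [pvWalk, xlo, xhi, ylo, yhi]; omega
  | cons c cs ih =>
    intro x y h1 h2 h3 h4
    simp only [List.all_cons, Bool.and_eq_true] at h
    obtain ⟨hc, hall⟩ := h
    have ih' := ih hall
    have hx1 := xlo_nonpos cs; have hx2 := xhi_nonneg cs
    have hy1 := ylo_nonpos cs; have hy2 := yhi_nonneg cs
    simp only [goodC, Bool.or_eq_true, decide_eq_true_eq] at hc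
    rcases hc with ((hc | hc) | hc) | hc <;> subst hc
    · by_cases hy : 1 < y
      · rw [show pvWalk N M ('L' :: cs) x y = pvWalk N M cs x (y - 1) from by
            simp [pvWalk, ivm_L, hy]]
        rw [ih' x (y - 1) h1 h2 (by omega) (by omega)]
        simp only [xlo, xhi, ylo, yhi, stepx_L, stepy_L]
        omega
      · rw [show pvWalk N M ('L' :: cs) x y = false from by simp [pvWalk, ivm_L, hy]]
        simp only [xlo, xhi, ylo, yhi, stepx_L, stepy_L]
        simp only [Bool.false_eq_true, false_iff]
        omega
    · by_cases hy : y < M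
      · rw [show pvWalk N M ('R' :: cs) x y = pvWalk N M cs x (y + 1) from by
            simp [pvWalk, ivm_R, hy]]
        rw [ih' x (y + 1) h1 h2 (by omega) (by omega)]
        simp only [xlo, xhi, ylo, yhi, stepx_R, stepy_R]
        omega
      · rw [show pvWalk N M ('R' :: cs) x y = false from by simp [pvWalk, ivm_R, hy]]
        simp only [xlo, xhi, ylo, yhi, stepx_R, stepy_R]
        simp only [Bool.false_eq_true, false_iff]
        omega
    · by_cases hx : 1 < x
      · rw [show pvWalk N M ('U' :: cs) x y = pvWalk N M cs (x - 1) y from by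
            simp [pvWalk, ivm_U, hx]]
        rw [ih' (x - 1) y (by omega) (by omega) h3 h4]
        simp only [xlo, xhi, ylo, yhi, stepx_U, stepy_U]
        omega
      · rw [show pvWalk N M ('U' :: cs) x y = false from by simp [pvWalk, ivm_U, hx]]
        simp only [xlo, xhi, ylo, yhi, stepx_U, stepy_U]
        simp only [Bool.false_eq_true, false_iff]
        omega
    · by_cases hx : x < N
      · rw [show pvWalk N M ('D' :: cs) x y = pvWalk N M cs (x + 1) y from by
            simp [pvWalk, ivm_D, hx]]
        rw [ih' (x + 1) y (by omega) (by omega) h3 h4]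
        simp only [xlo, xhi, ylo, yhi, stepx_D, stepy_D]
        omega
      · rw [show pvWalk N M ('D' :: cs) x y = false from by simp [pvWalk, ivm_D, hx]]
        simp only [xlo, xhi, ylo, yhi, stepx_D, stepy_D]
        simp only [Bool.false_eq_true, false_iff]
        omega

theorem scan_eq (cs : List Char) :
    ∀ x y xmin xmax ymin ymax : Int, xmin ≤ x → x ≤ xmax → ymin ≤ y → y ≤ ymax →
      pvScan cs x y xmin xmax ymin ymax =
        if cs.all goodC = true then
          some (min xmin (x + xlo cs), max xmax (x + xhi cs),
                min ymin (y + ylo cs), max ymax (y + yhi cs))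
        else none := by
  induction cs with
  | nil =>
    intro x y xmin xmax ymin ymax h1 h2 h3 h4
    simp [pvScan, xlo, xhi, ylo, yhi]
    refine ⟨by omega, by omega, by omega, by omega⟩
  | cons c cs ih =>
    intro x y xmin xmax ymin ymax h1 h2 h3 h4
    have hx1 := xlo_nonpos cs; have hx2 := xhi_nonneg cs
    have hy1 := ylo_nonpos cs; have hy2 := yhi_nonneg cs
    by_cases hc : goodC c = true
    · simp only [goodC, Bool.or_eq_true, decide_eq_true_eq] at hc
      rcases hc with ((hc | hc) | hc) | hc <;> subst hc
      · rw [show pvScan ('L' :: cs) x y xmin xmax ymin ymax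
            = pvScan cs x (y - 1) (min xmin x) (max xmax x) (min ymin (y - 1)) (max ymax (y - 1))
            from by simp [pvScan]]
        rw [ih _ _ _ _ _ _ (by omega) (by omega) (by omega) (by omega)]
        rw [show ('L' :: cs).all goodC = cs.all goodC from by simp [goodC]]
        split
        · simp only [Option.some.injEq, Prod.mk.injEq, xlo, xhi, ylo, yhi, stepx_L, stepy_L]
          refine ⟨by omega, by omega, by omega, by omega⟩
        · rfl
      · rw [show pvScan ('R' :: cs) x y xmin xmax ymin ymax
            = pvScan cs x (y + 1) (min xmin x) (max xmax x) (min ymin (y + 1)) (max ymax (y + 1))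
            from by simp [pvScan]]
        rw [ih _ _ _ _ _ _ (by omega) (by omega) (by omega) (by omega)]
        rw [show ('R' :: cs).all goodC = cs.all goodC from by simp [goodC]]
        split
        · simp only [Option.some.injEq, Prod.mk.injEq, xlo, xhi, ylo, yhi, stepx_R, stepy_R]
          refine ⟨by omega, by omega, by omega, by omega⟩
        · rfl
      · rw [show pvScan ('U' :: cs) x y xmin xmax ymin ymax
            = pvScan cs (x - 1) y (min xmin (x - 1)) (max xmax (x - 1)) (min ymin y) (max ymax y)
            from by simp [pvScan]]
        rw [ih _ _ _ _ _ _ (by omega) (by omega) (by omega) (by omega)]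
        rw [show ('U' :: cs).all goodC = cs.all goodC from by simp [goodC]]
        split
        · simp only [Option.some.injEq, Prod.mk.injEq, xlo, xhi, ylo, yhi, stepx_U, stepy_U]
          refine ⟨by omega, by omega, by omega, by omega⟩
        · rfl
      · rw [show pvScan ('D' :: cs) x y xmin xmax ymin ymax
            = pvScan cs (x + 1) y (min xmin (x + 1)) (max xmax (x + 1)) (min ymin y) (max ymax y)
            from by simp [pvScan]]
        rw [ih _ _ _ _ _ _ (by omega) (by omega) (by omega) (by omega)]
        rw [show ('D' :: cs).all goodC = cs.all goodC from by simp [goodC]]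
        split
        · simp only [Option.some.injEq, Prod.mk.injEq, xlo, xhi, ylo, yhi, stepx_D, stepy_D]
          refine ⟨by omega, by omega, by omega, by omega⟩
        · rfl
    · simp only [goodC, Bool.or_eq_true, decide_eq_true_eq, not_or] at hc
      rw [show pvScan (c :: cs) x y xmin xmax ymin ymax = none from by
        simp [pvScan, hc.1.1.1, hc.1.1.2, hc.1.2, hc.2]]
      rw [if_neg (by simp [goodC, hc.1.1.1, hc.1.1.2, hc.1.2, hc.2])]

theorem loopJ_none (N M : Int) (cs : List Char) (i : Int) (js : List Int)
    (h : ∀ j ∈ js, pvWalk N M cs i j = false) : pvLoopJ N M cs i js = none := by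
  induction js with
  | nil => rfl
  | cons j js ih =>
    simp only [pvLoopJ, h j (by simp)]
    simp only [Bool.false_eq_true, if_false]
    exact ih (fun j hj => h j (by simp [hj]))

theorem loopJ_found (N M : Int) (cs : List Char) (i : Int)
    (hall : cs.all goodC = true) (hi1 : 1 ≤ i) (hiN : i ≤ N)
    (hr1 : 1 ≤ i + xlo cs) (hr2 : i + xhi cs ≤ N)
    (hcol : 1 - ylo cs ≤ M - yhi cs) :
    ∀ (n : Nat) (a : Int), 1 ≤ a → a ≤ 1 - ylo cs → (M + 1 - a).toNat = n →
      pvLoopJ N M cs i (PySem.List.pyRange a (M + 1) 1) = some [i, 1 - ylo cs] := by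
  have hy1 := ylo_nonpos cs; have hy2 := yhi_nonneg cs
  intro n
  induction n with
  | zero =>
    intro a ha1 ha2 hn
    omega
  | succ n ihn =>
    intro a ha1 ha2 hn
    have halt : a < M + 1 := by omega
    rw [PySem.List.pyRange_one_cons halt]
    simp only [pvLoopJ]
    have hwc := walk_char N M cs hall i a hi1 hiN ha1 (by omega)
    by_cases hfind : a = 1 - ylo cs
    · have hw : pvWalk N M cs i a = true := by rw [hwc]; omega
      subst hfind
      simp [hw]
    · have hw : pvWalk N M cs i a = false := by
        rw [Bool.eq_false_iff, ne_eq, hwc]; omega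
      simp only [hw, Bool.false_eq_true, if_false]
      exact ihn (a + 1) (by omega) (by omega) (by omega)

theorem loopI_none (N M : Int) (cs : List Char) (is' : List Int)
    (h : ∀ i ∈ is', pvLoopJ N M cs i (PySem.List.pyRange 1 (M + 1) 1) = none) :
    pvLoopI N M cs is' = none := by
  induction is' with
  | nil => rfl
  | cons i is' ih =>
    simp only [pvLoopI, h i (by simp)]
    exact ih (fun i hi => h i (by simp [hi]))

theorem loopJ_none_full (N M : Int) (cs : List Char) (i : Int)
    (hall : cs.all goodC = true) (hi1 : 1 ≤ i) (hiN : i ≤ N)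
    (hbad : ¬(1 ≤ i + xlo cs ∧ i + xhi cs ≤ N ∧ 1 - ylo cs ≤ M - yhi cs)) :
    pvLoopJ N M cs i (PySem.List.pyRange 1 (M + 1) 1) = none := by
  apply loopJ_none
  intro j hj
  rw [PySem.List.mem_pyRange_one] at hj
  rw [Bool.eq_false_iff, ne_eq, walk_char N M cs hall i j hi1 hiN (by omega) (by omega)]
  omega

theorem loopI_found (N M : Int) (cs : List Char)
    (hall : cs.all goodC = true)
    (hrow : 1 - xlo cs ≤ N - xhi cs) (hcol : 1 - ylo cs ≤ M - yhi cs) :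
    ∀ (n : Nat) (a : Int), 1 ≤ a → a ≤ 1 - xlo cs → (N + 1 - a).toNat = n →
      pvLoopI N M cs (PySem.List.pyRange a (N + 1) 1) = some [1 - xlo cs, 1 - ylo cs] := by
  have hx1 := xlo_nonpos cs; have hx2 := xhi_nonneg cs
  have hy1 := ylo_nonpos cs; have hy2 := yhi_nonneg cs
  intro n
  induction n with
  | zero => intro a ha1 ha2 hn; omega
  | succ n ihn =>
    intro a ha1 ha2 hn
    have halt : a < N + 1 := by omega
    rw [PySem.List.pyRange_one_cons halt]
    simp only [pvLoopI]
    by_cases hfind : a = 1 - xlo cs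
    · have hJ := loopJ_found N M cs a hall ha1 (by omega) (by omega) (by omega) hcol
        (M + 1 - 1).toNat 1 (by omega) (by omega) rfl
      rw [hJ, hfind]
    · have hJ : pvLoopJ N M cs a (PySem.List.pyRange 1 (M + 1) 1) = none :=
        loopJ_none_full N M cs a hall ha1 (by omega) (by omega)
      rw [hJ]
      exact ihn (a + 1) (by omega) (by omega) (by omega)

theorem loopI_none_full (N M : Int) (cs : List Char)
    (hall : cs.all goodC = true)
    (hbad : ¬(1 - xlo cs ≤ N - xhi cs ∧ 1 - ylo cs ≤ M - yhi cs)) :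
    pvLoopI N M cs (PySem.List.pyRange 1 (N + 1) 1) = none := by
  apply loopI_none
  intro i hi
  rw [PySem.List.mem_pyRange_one] at hi
  exact loopJ_none_full N M cs i hall (by omega) (by omega) (by omega)

theorem loopI_bad (N M : Int) (cs : List Char) (hall : cs.all goodC = false) :
    pvLoopI N M cs (PySem.List.pyRange 1 (N + 1) 1) = none := by
  apply loopI_none
  intro i _
  exact loopJ_none N M cs i _ (fun j _ => walk_bad N M cs hall i j)

-- ===== VERDICT (by name: the statement is the Claim_ definition above) =====
theorem find_start_position_spec : Claim_equal_find_start_position := by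
  unfold Claim_equal_find_start_position
  intro N M s _
  unfold Spec_find_start_position
  set cs := s.toList with hcs
  have hx1 := xlo_nonpos cs; have hx2 := xhi_nonneg cs
  have hy1 := ylo_nonpos cs; have hy2 := yhi_nonneg cs
  have hscan := scan_eq cs 0 0 0 0 0 0 le_rfl le_rfl le_rfl le_rfl
  by_cases hall : cs.all goodC = true
  · rw [if_pos hall] at hscan
    unfold find_start_position find_start_position_alt
    rw [← hcs, hscan]
    simp only [zero_add]
    rw [show min (0:Int) (xlo cs) = xlo cs by omega, show max (0:Int) (xhi cs) = xhi cs by omega,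
        show min (0:Int) (ylo cs) = ylo cs by omega, show max (0:Int) (yhi cs) = yhi cs by omega]
    by_cases hfeas : 1 - xlo cs ≤ N - xhi cs ∧ 1 - ylo cs ≤ M - yhi cs
    · rw [loopI_found N M cs hall hfeas.1 hfeas.2 (N + 1 - 1).toNat 1 le_rfl (by omega) rfl]
      rw [if_pos (by constructor <;> omega)]
      rfl
    · rw [loopI_none_full N M cs hall hfeas]
      rw [if_neg (by omega)]
      rfl
  · rw [if_neg hall] at hscan
    unfold find_start_position find_start_position_alt
    rw [Bool.not_eq_true] at hall
    rw [← hcs, hscan, loopI_bad N M cs hall]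
    rfl
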